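-- pv_equiv track=rewrite | github.com/letmeentertainyou/Advent-of-Code | 2023/days/5/part_2.py | assemble_maps
-- ===== SOURCE A (Python) =====
-- def assemble_maps(file):
--     maps = {}
--     index = 0
--     for line in file:
--         if line == "\n":
--             index += 1
--         elif ":" not in line:
--             entry = [int(i) for i in line.strip().split(" ")]
--             if index not in maps:
--                 maps[index] = [entry]
--             else:
--                 maps[index].append(entry)
--     for key in maps.keys():
--         maps[key] = sorted(maps[key])
--
--     return maps
-- ===== SOURCE B (Python) =====
-- def assemble_maps(file):
--     # Group the lines into segments separated by blank lines, then build the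
--     # dict per segment (segment position = number of blank lines before it),
--     # sorting each group as it is stored instead of in a second pass.
--     segments = []
--     cur = []
--     for line in file:
--         if line == "\n":
--             segments.append(cur)
--             cur = []
--         else:
--             cur.append(line)
--     segments.append(cur)
--     maps = {}
--     for idx, seg in enumerate(segments):
--         triples = [[int(i) for i in line.strip().split(" ")]
--                    for line in seg if ":" not in line]
--         if triples:
--             maps[idx] = sorted(triples)
--     return maps
-- ===== Notes on version B (the rewrite author's own statement) =====
-- stated objective: alternative
-- what changed: B splits the lines into blank-separated segments and builds each dict entry already sorted from its segment's non-header lines, replacing A's line-by-line dict mutation with a running index plus a second sorting pass over the keys.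
import Mathlib
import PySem

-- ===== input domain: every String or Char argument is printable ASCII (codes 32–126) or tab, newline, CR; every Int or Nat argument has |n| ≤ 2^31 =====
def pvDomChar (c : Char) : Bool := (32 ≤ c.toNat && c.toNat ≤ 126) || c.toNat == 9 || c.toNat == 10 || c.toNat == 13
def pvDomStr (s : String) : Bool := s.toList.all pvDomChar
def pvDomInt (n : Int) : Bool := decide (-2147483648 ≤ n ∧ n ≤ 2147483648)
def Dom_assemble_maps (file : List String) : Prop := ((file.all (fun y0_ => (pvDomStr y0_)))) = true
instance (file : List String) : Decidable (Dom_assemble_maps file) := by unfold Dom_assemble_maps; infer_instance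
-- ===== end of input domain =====

-- B groups the lines into blank-separated segments and builds each dict entry
-- (already sorted) per segment, instead of A's line-by-line dict mutation with
-- a second sorting pass; same return value, similar cost (objective: alternative).

-- ===== PORT A =====
-- entry = [int(i) for i in line.strip().split(" ")]  (both Pythons contain this
-- same comprehension; int() is PySem.Int.ofStr?, total under Pre_ below)
def pvInts (line : String) : List Int :=
  ((PySem.Str.split? (PySem.Str.strip line) " ").getD []).map
    (fun t => (PySem.Int.ofStr? t).getD 0)

-- the body of A's first loop (state: (maps, index))
def pvAstep (st : PySem.Dict Int (List (List Int)) × Int) (line : String) :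
    PySem.Dict Int (List (List Int)) × Int :=
  if line = "\n" then (st.1, st.2 + 1)
  else if PySem.Str.isIn ":" line then st
  else
    let entry := pvInts line
    if !st.1.contains st.2 then (st.1.insert st.2 [entry], st.2)
    else (st.1.insert st.2 (st.1.getD st.2 [] ++ [entry]), st.2)

def assemble_maps (file : List String) : List (Int × List (List Int)) :=
  let st := file.foldl pvAstep (PySem.Dict.empty, 0)
  -- for key in maps.keys(): maps[key] = sorted(maps[key])
  let maps := st.1.keys.foldl
    (fun (d : PySem.Dict Int (List (List Int))) k =>
      d.insert k (PySem.List.sorted (d.getD k []) (fun x => x) false)) st.1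
  maps.items

-- ===== PORT B =====
-- the body of B's splitting loop (state: (segments, cur))
def pvSplitStep (st : List (List String) × List String) (line : String) :
    List (List String) × List String :=
  if line = "\n" then (st.1 ++ [st.2], []) else (st.1, st.2 ++ [line])

-- [[int(i) for i in line.strip().split(" ")] for line in seg if ":" not in line]
def pvEntries (seg : List String) : List (List Int) :=
  (seg.filter (fun line => !PySem.Str.isIn ":" line)).map pvInts

-- the body of B's dict-building loop over enumerate(segments)
def pvBstep (d : PySem.Dict Int (List (List Int))) (q : Int × List String) :
    PySem.Dict Int (List (List Int)) :=
  let triples := pvEntries q.2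
  if triples = [] then d else d.insert q.1 (PySem.List.sorted triples (fun x => x) false)

def assemble_maps_alt (file : List String) : List (Int × List (List Int)) :=
  let p := file.foldl pvSplitStep ([], [])
  let segments := p.1 ++ [p.2]
  ((PySem.List.enumerate segments 0).foldl pvBstep PySem.Dict.empty).items

-- ===== PRECONDITION & SPEC =====
-- Pre_ excludes exactly the inputs where Python A raises ValueError: a line that is
-- neither "\n" nor a ':'-header whose stripped space-split tokens do not all parse as int().
def Pre_assemble_maps (file : List String) : Prop :=
  ∀ line ∈ file, line ≠ "\n" → PySem.Str.isIn ":" line = false →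
    ∀ t ∈ (PySem.Str.split? (PySem.Str.strip line) " ").getD [],
      (PySem.Int.ofStr? t).isSome = true
instance (file : List String) : Decidable (Pre_assemble_maps file) := by
  unfold Pre_assemble_maps; infer_instance

def pvWitness_assemble_maps : List String :=
  ["seeds: 79 14\n", "\n", "a-map:\n", "50 98 2\n", "52 50 48\n", "\n", "0 15 37\n"]

def Spec_assemble_maps (file : List String) (out : List (Int × List (List Int))) : Prop := out = assemble_maps_alt file
instance (file : List String) (out : List (Int × List (List Int))) : Decidable (Spec_assemble_maps file out) := by unfold Spec_assemble_maps; infer_instance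

-- ===== CLAIM (what is proved, stated in full; the proofs are below) =====
def Claim_equal_assemble_maps : Prop := ∀ (file : List String), Dom_assemble_maps file → Pre_assemble_maps file → Spec_assemble_maps file (assemble_maps file)

-- ===== LEMMAS AND PROOFS =====

-- recursive form of B's segment splitter, used only by the proofs
def pvSegs (cur : List String) : List String → List (List String)
  | [] => [cur]
  | l :: ls => if l = "\n" then cur :: pvSegs [] ls else pvSegs (cur ++ [l]) ls

lemma pvSplit_eq (file : List String) : ∀ (acc : List (List String)) (cur : List String),
    (file.foldl pvSplitStep (acc, cur)).1 ++ [(file.foldl pvSplitStep (acc, cur)).2]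
      = acc ++ pvSegs cur file := by
  induction file with
  | nil => intro acc cur; simp [pvSegs]
  | cons l ls ih =>
    intro acc cur
    by_cases h : l = "\n" <;> simp [pvSplitStep, pvSegs, h, ih]

-- A's entry-line action at a fixed index
def pvApp (idx : Int) (d : PySem.Dict Int (List (List Int))) (e : List Int) :
    PySem.Dict Int (List (List Int)) :=
  if !d.contains idx then d.insert idx [e] else d.insert idx (d.getD idx [] ++ [e])

lemma pvApp_fold_insert (es : List (List Int)) (idx : Int) :
    ∀ (d : PySem.Dict Int (List (List Int))) (v : List (List Int)),
    es.foldl (pvApp idx) (d.insert idx v) = d.insert idx (v ++ es) := by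
  induction es with
  | nil => intro d v; simp
  | cons e es ih =>
    intro d v
    have h1 : pvApp idx (d.insert idx v) e = d.insert idx (v ++ [e]) := by
      simp [pvApp, PySem.Dict.contains_insert_self, PySem.Dict.getD_insert_self,
        PySem.Dict.insert_insert_self]
    simp only [List.foldl_cons, h1, ih]
    simp

lemma pvApp_fold (es : List (List Int)) (idx : Int)
    (d : PySem.Dict Int (List (List Int))) (h : d.contains idx = false) :
    es.foldl (pvApp idx) d = if es = [] then d else d.insert idx es := by
  cases es with
  | nil => simp
  | cons e es =>
    have h1 : pvApp idx d e = d.insert idx [e] := by simp [pvApp, h]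
    simp only [List.foldl_cons, h1, pvApp_fold_insert]
    simp

-- A's first loop, viewed per segment
lemma pvA_fold (file : List String) :
    ∀ (d : PySem.Dict Int (List (List Int))) (idx : Int) (cur : List String),
    (∀ k : Int, idx ≤ k → d.contains k = false) →
    file.foldl pvAstep ((pvEntries cur).foldl (pvApp idx) d, idx)
      = ((PySem.List.enumerate (pvSegs cur file) idx).foldl
           (fun d q => if pvEntries q.2 = [] then d
                       else d.insert q.1 (pvEntries q.2)) d,
         idx + (file.count "\n" : Int)) := by
  induction file with
  | nil =>
    intro d idx cur h
    have h0 : d.contains idx = false := h idx le_rfl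
    simp [pvSegs, PySem.List.enumerate, pvApp_fold _ _ _ h0]
  | cons l ls ih =>
    intro d idx cur h
    by_cases hnl : l = "\n"
    · subst hnl
      have hstep : pvAstep ((pvEntries cur).foldl (pvApp idx) d, idx) "\n"
          = ((pvEntries cur).foldl (pvApp idx) d, idx + 1) := by simp [pvAstep]
      have h0 : d.contains idx = false := h idx le_rfl
      have hS : (pvEntries cur).foldl (pvApp idx) d
          = if pvEntries cur = [] then d else d.insert idx (pvEntries cur) :=
        pvApp_fold _ _ _ h0
      have h' : ∀ k : Int, idx + 1 ≤ k →
          ((pvEntries cur).foldl (pvApp idx) d).contains k = false := by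
        intro k hk
        rw [hS]
        have hne : (k == idx) = false := by simp; omega
        split <;> simp [PySem.Dict.contains_insert, hne, h k (by omega)]
      have hIH := ih ((pvEntries cur).foldl (pvApp idx) d) (idx + 1) [] h'
      have hnil : pvEntries ([] : List String) = [] := rfl
      rw [hnil, List.foldl_nil] at hIH
      rw [List.foldl_cons, hstep, hIH,
        show pvSegs cur ("\n" :: ls) = cur :: pvSegs [] ls from by simp [pvSegs],
        PySem.List.enumerate_cons, List.foldl_cons]
      simp only [Prod.mk.injEq]
      constructor
      · rw [hS]
      · rw [List.count_cons_self]; push_cast; ring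
    · have hsegs : pvSegs cur (l :: ls) = pvSegs (cur ++ [l]) ls := by
        simp [pvSegs, hnl]
      have hcnt : ((l :: ls).count "\n") = ls.count "\n" := by
        simp [hnl]
      by_cases hc : PySem.Str.isIn ":" l
      · have hc' : PySem.Chars.isIn [':'] l.toList = true := by simpa using hc
        have hfil : pvEntries (cur ++ [l]) = pvEntries cur := by
          simp [pvEntries, List.filter_append, hc']
        have hstep : pvAstep ((pvEntries cur).foldl (pvApp idx) d, idx) l
            = ((pvEntries cur).foldl (pvApp idx) d, idx) := by
          simp [pvAstep, hnl, hc']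
        have hIH := ih d idx (cur ++ [l]) h
        rw [hfil] at hIH
        rw [List.foldl_cons, hstep, hIH, hsegs, hcnt]
      · have hc' : PySem.Chars.isIn [':'] l.toList = false := by
          simpa using hc
        have hfil : pvEntries (cur ++ [l]) = pvEntries cur ++ [pvInts l] := by
          simp [pvEntries, List.filter_append, hc']
        have hstep : pvAstep ((pvEntries cur).foldl (pvApp idx) d, idx) l
            = (pvApp idx ((pvEntries cur).foldl (pvApp idx) d) (pvInts l), idx) := by
          simp only [pvAstep, pvApp, hnl]
          simp [hc']
          split <;> rfl
        have hIH := ih d idx (cur ++ [l]) h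
        rw [hfil] at hIH
        simp only [List.foldl_append, List.foldl_cons, List.foldl_nil] at hIH
        rw [List.foldl_cons, hstep, hsegs, hcnt]
        exact hIH

-- items of the grouped fold, parametric in the post-processing of each group
lemma pvGroup_items (f : List (List Int) → List (List Int)) :
    ∀ (l : List (Int × List String)) (d : PySem.Dict Int (List (List Int))),
    (∀ q ∈ l, d.contains q.1 = false) → (l.map (·.1)).Nodup →
    (l.foldl (fun d q => if pvEntries q.2 = [] then d
                         else d.insert q.1 (f (pvEntries q.2))) d).items
      = d.items ++ l.filterMap (fun q => if pvEntries q.2 = [] then none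
                                         else some (q.1, f (pvEntries q.2))) := by
  intro l
  induction l with
  | nil => intro d _ _; simp
  | cons q l ih =>
    intro d hfresh hnd
    have hq : d.contains q.1 = false := hfresh q (by simp)
    by_cases he : pvEntries q.2 = []
    · rw [List.foldl_cons, if_pos he,
        List.filterMap_cons_none (by simp [he]),
        ih d (fun p hp => hfresh p (by simp [hp])) (by simp at hnd; exact hnd.2)]
    · have hfresh' : ∀ p ∈ l, (d.insert q.1 (f (pvEntries q.2))).contains p.1 = false := by
        intro p hp
        have hne : (p.1 == q.1) = false := by
          simp only [List.map_cons, List.nodup_cons] at hnd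
          simp
          intro hh
          exact hnd.1 (hh ▸ List.mem_map_of_mem hp)
        simp [PySem.Dict.contains_insert, hne, hfresh p (by simp [hp])]
      have hfm : (q :: l).filterMap
          (fun q => if pvEntries q.2 = [] then none else some (q.1, f (pvEntries q.2)))
            = (q.1, f (pvEntries q.2)) ::
              l.filterMap (fun q => if pvEntries q.2 = [] then none
                else some (q.1, f (pvEntries q.2))) := by
        rw [List.filterMap_cons]
        simp [he]
      rw [List.foldl_cons, if_neg he, hfm,
        ih _ hfresh' (by simp at hnd ⊢; exact hnd.2),
        PySem.Dict.items_insert]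
      simp [hq]

-- first components of the grouped result form a sublist of the input keys
lemma pvGroup_fst_sublist (f : List (List Int) → List (List Int)) (l : List (Int × List String)) :
    ((l.filterMap (fun q => if pvEntries q.2 = [] then none
                            else some (q.1, f (pvEntries q.2)))).map (·.1)).Sublist
      (l.map (·.1)) := by
  induction l with
  | nil => simp
  | cons q l ih =>
    by_cases he : pvEntries q.2 = []
    · simp only [List.filterMap_cons, he, List.map_cons]
      exact ih.cons _
    · simp only [List.filterMap_cons, if_neg he, List.map_cons]
      exact ih.cons₂ _

-- A's second loop sorts every stored value in place
lemma pvSort_pass :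
    ∀ (ks : List Int) (d : PySem.Dict Int (List (List Int))),
    ks.Nodup → d.keys.Nodup → (∀ k ∈ ks, k ∈ d.keys) →
    (ks.foldl (fun d k => d.insert k (PySem.List.sorted (d.getD k []) (fun x => x) false)) d).items
      = d.items.map (fun p => if p.1 ∈ ks
          then (p.1, PySem.List.sorted p.2 (fun x => x) false) else p) := by
  intro ks
  induction ks with
  | nil => intro d _ _ _; simp
  | cons k ks ih =>
    intro d hnd hkeys hmem
    have hk : d.contains k = true :=
      (PySem.Dict.contains_iff_mem_keys _ _).2 (hmem k (by simp))
    have hitems := PySem.Dict.items_insert_of_contains d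
      (PySem.List.sorted (d.getD k []) (fun x => x) false) hk
    have hkeys' : (d.insert k (PySem.List.sorted (d.getD k []) (fun x => x) false)).keys = d.keys := by
      simp only [PySem.Dict.keys_insert_of_contains _ _ hk]
    simp only [List.foldl_cons]
    rw [ih _ (by simp at hnd; exact hnd.2) (by rw [hkeys']; exact hkeys)
      (by rw [hkeys']; intro k' hk'; exact hmem k' (by simp [hk'])), hitems,
      List.map_map]
    apply List.map_congr_left
    rintro ⟨p1, p2⟩ hp
    simp only [Function.comp_apply]
    by_cases hpk : p1 = k
    · subst hpk
      have hgd : d.getD p1 [] = p2 := PySem.Dict.getD_of_mem_items d hp hkeys []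
      have hknot : p1 ∉ ks := by simp at hnd; exact hnd.1
      simp [hgd, hknot]
    · have : (p1 == k) = false := by simp [hpk]
      simp [this, hpk]

lemma pvB_items (f : List (List Int) → List (List Int)) (sgs : List (List String)) :
    ((PySem.List.enumerate sgs 0).foldl (fun d q => if pvEntries q.2 = [] then d
        else d.insert q.1 (f (pvEntries q.2))) PySem.Dict.empty).items
      = (PySem.List.enumerate sgs 0).filterMap
          (fun q => if pvEntries q.2 = [] then none else some (q.1, f (pvEntries q.2))) := by
  rw [pvGroup_items f _ PySem.Dict.empty (by intro q _; simp)
    (by rw [PySem.List.map_fst_enumerate]; exact PySem.List.nodup_pyRange_one _ _)]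
  simp [PySem.Dict.empty]

lemma pvBstep_eq : pvBstep = (fun d q => if pvEntries q.2 = [] then d
    else d.insert q.1 (PySem.List.sorted (pvEntries q.2) (fun x => x) false)) := rfl

-- ===== VERDICT (by name: the statement is the Claim_ definition above) =====
theorem assemble_maps_spec : Claim_equal_assemble_maps := by
  intro file _ _
  unfold Spec_assemble_maps assemble_maps assemble_maps_alt
  -- B's splitter produces pvSegs [] file
  have hsplit := pvSplit_eq file [] []
  simp only [List.nil_append] at hsplit
  -- A's first loop
  have hA := pvA_fold file PySem.Dict.empty 0 [] (by intro k _; simp)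
  rw [show (pvEntries ([] : List String)).foldl (pvApp 0) PySem.Dict.empty
      = PySem.Dict.empty from rfl] at hA
  have hMitems := pvB_items (fun v => v) (pvSegs [] file)
  simp only [] at hMitems
  have hBitems := pvB_items (fun v => PySem.List.sorted v (fun x => x) false) (pvSegs [] file)
  simp only [hsplit, hA, pvBstep_eq, hBitems]
  set M := (PySem.List.enumerate (pvSegs [] file) 0).foldl
    (fun d q => if pvEntries q.2 = [] then d else d.insert q.1 (pvEntries q.2))
    PySem.Dict.empty with hM
  have hMkeys : M.keys.Nodup := by
    show (M.items.map (·.1)).Nodup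
    rw [hMitems]
    exact ((by rw [PySem.List.map_fst_enumerate]; exact PySem.List.nodup_pyRange_one _ _ :
      ((PySem.List.enumerate (pvSegs [] file) 0).map (·.1)).Nodup).sublist
        (by simpa using pvGroup_fst_sublist (fun v => v) (PySem.List.enumerate (pvSegs [] file) 0)))
  rw [pvSort_pass M.keys M hMkeys hMkeys (fun k hk => hk)]
  have : ∀ p ∈ M.items, (if p.1 ∈ M.keys
      then (p.1, PySem.List.sorted p.2 (fun x => x) false) else p)
        = (p.1, PySem.List.sorted p.2 (fun x => x) false) := by
    intro p hp
    simp [PySem.Dict.mem_keys_of_mem_items M hp]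
  rw [List.map_congr_left this, hMitems, List.map_filterMap]
  apply List.filterMap_congr
  intro q _
  by_cases he : pvEntries q.2 = [] <;> simp [he]
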